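-- pv_equiv track=rewrite | github.com/miliar/Code_Jam_Webscraper | Solutions_python/Problem_181/1845.py | get_word
-- ===== SOURCE A (Python) =====
-- def get_word(original_trial_list, biggest_letter):
--     final_word = ''
--     final = False
--     for word in original_trial_list:
--         current_letters = [char for char in final_word]
--         if word == biggest_letter:
--             final_word = '{0}{1}'.format(word, final_word)
--         elif final_word and word >= max(current_letters):
--             final_word = '{0}{1}'.format(word, final_word)
--         else:
--             final_word = '{0}{1}'.format(final_word, word)
--     return final_word
-- ===== SOURCE B (Python) =====
-- def get_word(original_trial_list, biggest_letter):
--     fronts = []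
--     backs = []
--     m = None  # largest character placed so far
--     for word in original_trial_list:
--         if word == biggest_letter or (m is not None and word >= m):
--             fronts.append(word)
--         else:
--             backs.append(word)
--         for c in word:
--             if m is None or c > m:
--                 m = c
--     return ''.join(reversed(fronts)) + ''.join(backs)
-- ===== Notes on version B (the rewrite author's own statement) =====
-- stated objective: faster
-- what changed: Instead of rebuilding the accumulated string by prepend/append and rescanning all of its characters with max() on every iteration (quadratic), B keeps two word lists (front/back) and a single running maximum character, assembling the result with one join at the end.
import Mathlib
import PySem

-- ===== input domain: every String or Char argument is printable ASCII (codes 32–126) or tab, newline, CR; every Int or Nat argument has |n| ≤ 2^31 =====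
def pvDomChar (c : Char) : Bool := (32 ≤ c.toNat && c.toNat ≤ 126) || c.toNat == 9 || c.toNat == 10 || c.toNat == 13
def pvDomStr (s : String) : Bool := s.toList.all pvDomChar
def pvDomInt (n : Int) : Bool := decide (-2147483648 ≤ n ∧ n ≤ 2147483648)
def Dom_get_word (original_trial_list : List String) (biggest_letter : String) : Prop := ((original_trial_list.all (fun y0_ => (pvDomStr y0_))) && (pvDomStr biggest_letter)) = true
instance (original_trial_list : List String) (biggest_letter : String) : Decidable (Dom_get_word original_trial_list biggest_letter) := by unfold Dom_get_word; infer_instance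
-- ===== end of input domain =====

-- B replaces A's per-step string rebuilding and per-step max() rescan by two word
-- accumulators and one running maximum character, assembled once at the end (asymptotically faster: no per-step rescan).

-- Python's lexicographic string comparison `a <= b` over chars (shared builtin, used by both ports)
def pyLE : List Char → List Char → Bool
  | [], _ => true
  | _ :: _, [] => false
  | a :: as, b :: bs => if a < b then true else if b < a then false else pyLE as bs

-- ===== PORT A =====
-- literal port of A's loop: state is the accumulated word (as chars);
-- `max(current_letters)` is PySem.List.max?; its `.getD ' '` default is unreachable (guarded by fw ≠ [])
def get_word (original_trial_list : List String) (biggest_letter : String) : String :=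
  String.ofList (original_trial_list.foldl (fun fw word =>
    let w := word.toList
    let current_letters := fw
    if w = biggest_letter.toList then w ++ fw
    else if fw ≠ [] ∧ pyLE [(PySem.List.max? current_letters (fun x => x)).getD ' '] w then w ++ fw
    else fw ++ w) [])

-- ===== PORT B =====
-- port of Source B: state (fronts, backs, m) = front word list, back word list, running max char;
-- the inner `for c in word` running-max loop is the foldl; result assembled once at the end
def get_word_alt (original_trial_list : List String) (biggest_letter : String) : String :=
  let st := original_trial_list.foldl
    (fun (st : List (List Char) × List (List Char) × Option Char) word =>
      let w := word.toList
      let st' :=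
        if w = biggest_letter.toList ∨ (st.2.2.isSome ∧ pyLE [st.2.2.getD ' '] w)
        then (st.1 ++ [w], st.2.1, st.2.2)
        else (st.1, st.2.1 ++ [w], st.2.2)
      (st'.1, st'.2.1,
        w.foldl (fun acc c =>
          match acc with
          | none => some c
          | some x => if x < c then some c else some x) st'.2.2))
    ([], [], none)
  String.ofList (st.1.reverse.flatten ++ st.2.1.flatten)

-- ===== PRECONDITION & SPEC =====
def Spec_get_word (original_trial_list : List String) (biggest_letter : String) (out : String) : Prop := out = get_word_alt original_trial_list biggest_letter
instance (original_trial_list : List String) (biggest_letter : String) (out : String) : Decidable (Spec_get_word original_trial_list biggest_letter out) := by unfold Spec_get_word; infer_instance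

-- ===== CLAIM (what is proved, stated in full; the proofs are below) =====
def Claim_equal_get_word : Prop := ∀ (original_trial_list : List String) (biggest_letter : String), Dom_get_word original_trial_list biggest_letter → Spec_get_word original_trial_list biggest_letter (get_word original_trial_list biggest_letter)

-- ===== LEMMAS AND PROOFS =====

-- B's inner running-max update, named for the proofs
def updMax (acc : Option Char) (c : Char) : Option Char :=
  match acc with
  | none => some c
  | some x => if x < c then some c else some x

-- A's loop body, named for the proofs (definitionally A's lambda on char lists)
def stepA (bl : List Char) (fw : List Char) (w : List Char) : List Char :=
  if w = bl then w ++ fw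
  else if fw ≠ [] ∧ pyLE [(PySem.List.max? fw (fun x => x)).getD ' '] w then w ++ fw
  else fw ++ w

-- B's loop body, named for the proofs (definitionally B's lambda on char lists)
def stepB (bl : List Char) (st : List (List Char) × List (List Char) × Option Char)
    (w : List Char) : List (List Char) × List (List Char) × Option Char :=
  let st' :=
    if w = bl ∨ (st.2.2.isSome ∧ pyLE [st.2.2.getD ' '] w)
    then (st.1 ++ [w], st.2.1, st.2.2)
    else (st.1, st.2.1 ++ [w], st.2.2)
  (st'.1, st'.2.1, w.foldl updMax st'.2.2)

lemma updMax_some (x c : Char) : updMax (some x) c = some (max x c) := by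
  unfold updMax
  rcases le_or_gt x c with h | h
  · rcases lt_or_eq_of_le h with h' | h'
    · simp [h', max_eq_right h]
    · subst h'; simp
  · simp [not_lt_of_gt h, max_eq_left (le_of_lt h)]

lemma foldl_updMax_some (l : List Char) (x : Char) :
    l.foldl updMax (some x) = some (l.foldl max x) := by
  induction l generalizing x with
  | nil => rfl
  | cons c t ih => simp [List.foldl_cons, updMax_some, ih]

lemma foldl_updMax_none (l : List Char) :
    l.foldl updMax none = PySem.List.max? l (fun x => x) := by
  cases l with
  | nil => rfl
  | cons c t =>
    simp [List.foldl_cons, updMax, foldl_updMax_some, PySem.List.max?_id_cons]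

lemma max?_append (l1 l2 : List Char) :
    PySem.List.max? (l1 ++ l2) (fun x => x) = l2.foldl updMax (PySem.List.max? l1 (fun x => x)) := by
  cases l1 with
  | nil => simp [foldl_updMax_none, PySem.List.max?]
  | cons x t =>
    simp only [List.cons_append, PySem.List.max?_id_cons, List.foldl_append,
      foldl_updMax_some]

lemma max?_comm (l1 l2 : List Char) :
    PySem.List.max? (l1 ++ l2) (fun x => x) = PySem.List.max? (l2 ++ l1) (fun x => x) := by
  rcases h1 : PySem.List.max? (l1 ++ l2) (fun x => x) with _ | m1
  · rw [PySem.List.max?_eq_none_iff] at h1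
    have : l2 ++ l1 = ([] : List Char) := by
      rcases List.append_eq_nil_iff.mp h1 with ⟨ha, hb⟩; simp [ha, hb]
    rw [this]
    simp [PySem.List.max?]
  · rcases h2 : PySem.List.max? (l2 ++ l1) (fun x => x) with _ | m2
    · rw [PySem.List.max?_eq_none_iff] at h2
      rcases List.append_eq_nil_iff.mp h2 with ⟨ha, hb⟩
      simp [ha, hb, PySem.List.max?] at h1
    · have hm1 := PySem.List.max?_mem h1
      have hm2 := PySem.List.max?_mem h2
      have h12 : m1 ≤ m2 := PySem.List.max?_isMax h2 m1 (by
        rw [List.mem_append] at hm1 ⊢; tauto)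
      have h21 : m2 ≤ m1 := PySem.List.max?_isMax h1 m2 (by
        rw [List.mem_append] at hm2 ⊢; tauto)
      rw [le_antisymm h12 h21]

lemma main_inv (bl : List Char) (l : List (List Char))
    (fw : List Char) (fronts backs : List (List Char)) (m : Option Char)
    (hfw : fw = fronts.reverse.flatten ++ backs.flatten)
    (hm : m = PySem.List.max? fw (fun x => x)) :
    l.foldl (stepA bl) fw =
      (l.foldl (stepB bl) (fronts, backs, m)).1.reverse.flatten ++
      (l.foldl (stepB bl) (fronts, backs, m)).2.1.flatten := by
  induction l generalizing fw fronts backs m with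
  | nil => simpa using hfw
  | cons w t ih =>
    simp only [List.foldl_cons]
    have hsome : m.isSome = decide (fw ≠ []) := by
      subst hm
      rcases h : PySem.List.max? fw (fun x => x) with _ | x
      · rw [PySem.List.max?_eq_none_iff] at h; simp [h]
      · have hne : fw ≠ [] := by
          intro hnil; rw [hnil] at h; simp [PySem.List.max?] at h
        simp [hne]
    have hcond : (w = bl ∨ (m.isSome ∧ pyLE [m.getD ' '] w)) ↔
        (w = bl ∨ (fw ≠ [] ∧ pyLE [(PySem.List.max? fw (fun x => x)).getD ' '] w)) := by
      subst hm; rw [hsome]; simp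
    by_cases hB : w = bl ∨ (m.isSome ∧ pyLE [m.getD ' '] w)
    · have hA : stepA bl fw w = w ++ fw := by
        rcases hcond.mp hB with h | h
        · simp [stepA, h]
        · by_cases hbl : w = bl <;> simp [stepA, hbl, h]
      have hBstep : stepB bl (fronts, backs, m) w = (fronts ++ [w], backs, w.foldl updMax m) := by
        simp [stepB, hB]
      rw [hA, hBstep]
      exact ih (w ++ fw) (fronts ++ [w]) backs (w.foldl updMax m)
        (by simp [hfw])
        (by rw [hm, ← max?_append, max?_comm])
    · have hA : stepA bl fw w = fw ++ w := by
        have h := (not_iff_not.mpr hcond).mp hB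
        push Not at h
        rcases h with ⟨hbl, hc⟩
        simp only [stepA, if_neg hbl]
        rw [if_neg]
        intro ⟨hne, hle⟩
        exact (hc hne).elim (by simp [hle])
      have hBstep : stepB bl (fronts, backs, m) w = (fronts, backs ++ [w], w.foldl updMax m) := by
        simp [stepB, hB]
      rw [hA, hBstep]
      exact ih (fw ++ w) fronts (backs ++ [w]) (w.foldl updMax m)
        (by simp [hfw, List.flatten_append])
        (by rw [hm, ← max?_append])

-- ===== VERDICT (by name: the statement is the Claim_ definition above) =====
theorem get_word_spec : Claim_equal_get_word := by
  intro l bl _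
  show get_word l bl = get_word_alt l bl
  have h := main_inv bl.toList (l.map String.toList) [] [] [] none (by simp) rfl
  simp only [List.foldl_map] at h
  exact congrArg String.ofList h
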